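-- pv_equiv track=rewrite | github.com/mindsdb/mindsdb | mindsdb/libs/helpers/parser.py | cleanStr
-- ===== SOURCE A (Python) =====
-- def cleanStr(str):
--     """
--     Do some cleaning, remove double spaces new lines, clean commas and others
--     :param str:
--     :return:
--     """
--     str = str.replace("\n", ' ')
--
--     clean_space_from = ['( ', ' )', ', ', '[ ', ' ]']
--     for str_to_replace in clean_space_from:
--         actual = str_to_replace.replace(' ', '')
--         str = str.replace(actual, str_to_replace)
--
--     str = ' (' + str + ') '
--     str = ' '.join(str.split())
--
--     return str
-- ===== SOURCE B (Python) =====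
-- def cleanStr(str):
--     s = str.replace("\n", ' ')
--     after = {'(', ',', '['}
--     before = {')', ']'}
--     parts = []
--     for ch in s:
--         if ch in before:
--             parts.append(' ')
--         parts.append(ch)
--         if ch in after:
--             parts.append(' ')
--     wrapped = ' (' + ''.join(parts) + ') '
--     return ' '.join(wrapped.split())
-- ===== Notes on version B (the rewrite author's own statement) =====
-- stated objective: alternative
-- what changed: Replaces A's five sequential full-string replace() passes with one single character-level pass driven by before/after punctuation sets, emitting each character with its adjacent space directly.
import Mathlib
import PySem

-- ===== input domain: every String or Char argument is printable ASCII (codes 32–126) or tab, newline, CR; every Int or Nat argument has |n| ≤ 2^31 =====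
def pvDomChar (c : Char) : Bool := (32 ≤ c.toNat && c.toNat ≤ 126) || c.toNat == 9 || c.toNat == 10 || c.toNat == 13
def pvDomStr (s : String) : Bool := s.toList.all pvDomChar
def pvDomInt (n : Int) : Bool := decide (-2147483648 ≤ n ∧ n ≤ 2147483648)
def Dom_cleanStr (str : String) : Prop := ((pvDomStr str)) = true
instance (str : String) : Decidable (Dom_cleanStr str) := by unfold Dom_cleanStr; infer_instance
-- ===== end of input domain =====

-- B replaces A's five sequential full-string replace() passes by one character-level
-- pass driven by before/after punctuation sets (alternative decomposition, same cost).


-- ===== PORT A =====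
def cleanStr (str : String) : String :=
  let s1 := PySem.Str.replace str "\n" " "
  let s2 := ["( ", " )", ", ", "[ ", " ]"].foldl
    (fun s strToReplace =>
      let actual := PySem.Str.replace strToReplace " " ""
      PySem.Str.replace s actual strToReplace) s1
  -- ' (' + str + ') '  (string concatenation, exact, via the char lists)
  let s3 := String.ofList (" (".toList ++ s2.toList ++ ") ".toList)
  PySem.Str.join " " (PySem.Str.split₀ s3)

-- ===== PORT B =====
def cleanStr_alt (str : String) : String :=
  let s := PySem.Str.replace str "\n" " "
  let afterS : PySem.Set Char := PySem.Set.ofList ['(', ',', '[']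
  let beforeS : PySem.Set Char := PySem.Set.ofList [')', ']']
  let parts : List Char := s.toList.foldl
    (fun acc ch =>
      let acc := if PySem.Set.contains beforeS ch then acc ++ [' '] else acc
      let acc := acc ++ [ch]
      if PySem.Set.contains afterS ch then acc ++ [' '] else acc) []
  -- ' (' + ''.join(parts) + ') '
  let wrapped := String.ofList (" (".toList ++ parts ++ ") ".toList)
  PySem.Str.join " " (PySem.Str.split₀ wrapped)

-- ===== PRECONDITION & SPEC =====
def Spec_cleanStr (str : String) (out : String) : Prop := out = cleanStr_alt str
instance (str : String) (out : String) : Decidable (Spec_cleanStr str out) := by unfold Spec_cleanStr; infer_instance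

-- ===== CLAIM (what is proved, stated in full; the proofs are below) =====
def Claim_equal_cleanStr : Prop := ∀ (str : String), Dom_cleanStr str → Spec_cleanStr str (cleanStr str)

-- ===== LEMMAS AND PROOFS =====

-- a single-character replace is a per-character flatMap
theorem replace_go_single (a : Char) (new : List Char) :
    ∀ (l acc : List Char),
      PySem.Chars.replace.go [a] new l.length l acc
        = acc.reverse ++ l.flatMap (fun c => if c = a then new else [c]) := by
  intro l
  induction l with
  | nil => intro acc; simp [PySem.Chars.replace.go]
  | cons c t ih =>
    intro acc
    simp only [List.length_cons, PySem.Chars.replace.go, List.isPrefixOf]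
    by_cases h : c = a
    · subst h
      simp [ih, List.flatMap_cons]
    · have : (a == c) = false := by simp; exact fun e => h e.symm
      simp [this, ih, List.flatMap_cons, h]

theorem replace_single (a : Char) (new l : List Char) :
    PySem.Chars.replace l [a] new
      = l.flatMap (fun c => if c = a then new else [c]) := by
  simp [PySem.Chars.replace, replace_go_single]

-- the per-character emission of B
def bfun (c : Char) : List Char :=
  (if c = ')' ∨ c = ']' then [' '] else []) ++ [c] ++
  (if c = '(' ∨ c = ',' ∨ c = '[' then [' '] else [])

-- A's five-replace cascade acts per character exactly as bfun
theorem cascade_eq_bfun (l : List Char) :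
    ((((l.flatMap (fun c => if c = '(' then ['(', ' '] else [c])).flatMap
        (fun c => if c = ')' then [' ', ')'] else [c])).flatMap
        (fun c => if c = ',' then [',', ' '] else [c])).flatMap
        (fun c => if c = '[' then ['[', ' '] else [c])).flatMap
        (fun c => if c = ']' then [' ', ']'] else [c])
      = l.flatMap bfun := by
  simp only [List.flatMap_assoc]
  refine List.flatMap_congr ?_
  intro c _
  by_cases h1 : c = '(' ; · subst h1; decide
  by_cases h2 : c = ')' ; · subst h2; decide
  by_cases h3 : c = ',' ; · subst h3; decide
  by_cases h4 : c = '[' ; · subst h4; decide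
  by_cases h5 : c = ']' ; · subst h5; decide
  simp [bfun, h1, h2, h3, h4, h5]

-- B's loop body, written as an append of one per-character chunk
theorem bbody_eq (ch : Char) (acc : List Char) :
    (let acc1 := if PySem.Set.contains (PySem.Set.ofList [')', ']']) ch then acc ++ [' '] else acc
     let acc2 := acc1 ++ [ch]
     if PySem.Set.contains (PySem.Set.ofList ['(', ',', '[']) ch then acc2 ++ [' '] else acc2)
      = acc ++ bfun ch := by
  have hA : PySem.Set.ofList ['(', ',', '['] = ['(', ',', '['] := by decide
  have hB : PySem.Set.ofList [')', ']'] = [')', ']'] := by decide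
  simp only [hA, hB, PySem.Set.contains, bfun]
  by_cases h1 : ch = '(' ; · subst h1; simp
  by_cases h2 : ch = ')' ; · subst h2; simp
  by_cases h3 : ch = ',' ; · subst h3; simp
  by_cases h4 : ch = '[' ; · subst h4; simp
  by_cases h5 : ch = ']' ; · subst h5; simp
  simp [h1, h2, h3, h4, h5]

theorem bloop_eq_flatMap (l : List Char) : ∀ (acc : List Char),
    l.foldl
      (fun acc ch =>
        let acc := if PySem.Set.contains (PySem.Set.ofList [')', ']']) ch then acc ++ [' '] else acc
        let acc := acc ++ [ch]
        if PySem.Set.contains (PySem.Set.ofList ['(', ',', '[']) ch then acc ++ [' '] else acc) acc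
      = acc ++ l.flatMap bfun := by
  induction l with
  | nil => intro acc; simp
  | cons c t ih =>
    intro acc
    simp only [List.foldl_cons, List.flatMap_cons]
    rw [bbody_eq c acc] at *
    rw [ih]
    simp

theorem cleanStr_spec' (str : String) : cleanStr str = cleanStr_alt str := by
  unfold cleanStr cleanStr_alt
  simp only [List.foldl_cons, List.foldl_nil]
  have e1 : PySem.Str.replace "( " " " "" = "(" := by decide
  have e2 : PySem.Str.replace " )" " " "" = ")" := by decide
  have e3 : PySem.Str.replace ", " " " "" = "," := by decide
  have e4 : PySem.Str.replace "[ " " " "" = "[" := by decide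
  have e5 : PySem.Str.replace " ]" " " "" = "]" := by decide
  rw [e1, e2, e3, e4, e5]
  set s := PySem.Str.replace str "\n" " " with hs
  have key : ∀ (t old new : String),
      (PySem.Str.replace t old new).toList = PySem.Chars.replace t.toList old.toList new.toList := by
    intro t old new; simp [PySem.Str.toList_replace]
  have hX : (PySem.Str.replace (PySem.Str.replace (PySem.Str.replace (PySem.Str.replace
      (PySem.Str.replace s "(" "( ") ")" " )") "," ", ") "[" "[ ") "]" " ]").toList
      = s.toList.flatMap bfun := by
    rw [key, key, key, key, key]
    rw [show ("(".toList) = ['('] from rfl, show (")".toList) = [')'] from rfl,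
        show (",".toList) = [','] from rfl, show ("[".toList) = ['['] from rfl,
        show ("]".toList) = [']'] from rfl]
    rw [replace_single, replace_single, replace_single, replace_single, replace_single]
    rw [show ("( ".toList) = ['(', ' '] from rfl, show (" )".toList) = [' ', ')'] from rfl,
        show (", ".toList) = [',', ' '] from rfl, show ("[ ".toList) = ['[', ' '] from rfl,
        show (" ]".toList) = [' ', ']'] from rfl]
    exact cascade_eq_bfun s.toList
  rw [hX, bloop_eq_flatMap]
  simp

-- ===== VERDICT (by name: the statement is the Claim_ definition above) =====
theorem cleanStr_spec : Claim_equal_cleanStr := by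
  intro str _
  exact cleanStr_spec' str
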